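-- pv_equiv track=rewrite | github.com/emmaliany/Algorithmic | algorithmic_exercises/exercise_3.py | is_sorted_palindrome
-- ===== SOURCE A (Python) =====
-- from math import ceil
--
-- def is_palindrome(sequence: str) -> bool:
--     """
--     find if a string is palindrome
--     :param sequence: str - the string the functions checks if palindrome
--     :return: bool - returns if sequence param is palindrome
--     """
--     end_index: int = len(sequence) - 1
--     middle: int = ceil(end_index / 2)
--
--     for start_index in range(middle):
--         if not sequence[start_index] == sequence[end_index]:
--             return False
--         end_index -= 1
--     return True
--
-- def is_sorted_palindrome(sequence: str) -> bool:
--     """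
--     find if a string is palindrome and if its in alphabetical order
--     :param sequence: str - the string the functions checks if sorted palindrome
--     :return: bool - returns if sequence param is sorted palindrome
--     """
--     if not is_palindrome(sequence):
--         return False
--     middle: int = ceil((len(sequence) - 1) / 2)
--     for index in range(middle):
--         if sequence[index] > sequence[index + 1]:
--             return False
--     return True
-- ===== SOURCE B (Python) =====
-- def is_sorted_palindrome(sequence: str) -> bool:
--     """Palindrome test by reverse-compare; order test by sorting the first-half prefix."""
--     prefix = sequence[:len(sequence) // 2 + 1]
--     return sequence == sequence[::-1] and list(prefix) == sorted(prefix)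
-- ===== Notes on version B (the rewrite author's own statement) =====
-- stated objective: idiomatic
-- what changed: Replaces A's two manual index loops (a mirror scan with a decremented end index, and an adjacent-comparison scan) by an idiomatic reverse-slice equality test for the palindrome plus a sort-based sortedness check of the first-half prefix.
import Mathlib
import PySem

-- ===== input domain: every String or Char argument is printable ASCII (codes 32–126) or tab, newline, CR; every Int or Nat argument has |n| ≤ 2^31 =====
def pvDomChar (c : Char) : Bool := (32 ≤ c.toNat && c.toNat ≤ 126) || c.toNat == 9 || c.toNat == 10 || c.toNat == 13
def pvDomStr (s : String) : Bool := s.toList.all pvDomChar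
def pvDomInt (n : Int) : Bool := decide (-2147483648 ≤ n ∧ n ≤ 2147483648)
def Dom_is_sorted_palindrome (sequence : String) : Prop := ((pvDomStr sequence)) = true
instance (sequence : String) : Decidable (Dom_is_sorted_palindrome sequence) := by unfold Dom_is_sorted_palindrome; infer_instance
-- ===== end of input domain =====

-- B: the same result (palindrome AND first-half non-decreasing), but via reverse-compare and a
-- sort-based sortedness check of the first-half prefix instead of A's two manual index loops.


-- ===== PORT A =====
-- ceil(e / 2) on an int, exactly: ⌈e/2⌉ = -((-e) // 2)
def pvCeilHalf (e : Int) : Int := -(PySem.Int.floordiv (-e) 2)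

-- the loop of is_palindrome: walks the range list, decrementing end_index each step
def pvPalLoop (seq : List Char) (endIdx : Int) : List Int → Bool
  | [] => true
  | i :: rest =>
    match PySem.List.pyGet? seq i, PySem.List.pyGet? seq endIdx with
    | some a, some b => if !(a == b) then false else pvPalLoop seq (endIdx - 1) rest
    | _, _ => false   -- IndexError; unreachable: every index the loop uses is in range

def pvIsPalindrome (sequence : String) : Bool :=
  let endIndex : Int := PySem.Str.len sequence - 1
  let middle : Int := pvCeilHalf endIndex
  pvPalLoop sequence.toList endIndex (PySem.List.pyRange 0 middle 1)

-- the loop of is_sorted_palindrome: adjacent comparison over range(middle)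
def pvSortLoop (seq : List Char) : List Int → Bool
  | [] => true
  | i :: rest =>
    match PySem.List.pyGet? seq i, PySem.List.pyGet? seq (i + 1) with
    | some a, some b => if a > b then false else pvSortLoop seq rest
    | _, _ => false   -- IndexError; unreachable: every index the loop uses is in range

def is_sorted_palindrome (sequence : String) : Bool :=
  if !pvIsPalindrome sequence then false
  else
    let middle : Int := pvCeilHalf (PySem.Str.len sequence - 1)
    pvSortLoop sequence.toList (PySem.List.pyRange 0 middle 1)

-- ===== PORT B =====
def is_sorted_palindrome_alt (sequence : String) : Bool :=
  let l := sequence.toList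
  let pfx := PySem.List.slice l none (some (PySem.Int.floordiv (PySem.Str.len sequence) 2 + 1))
  (PySem.Str.slice? sequence none none (-1) == some sequence) &&
  (pfx == PySem.List.sorted pfx (fun c => c) false)

-- ===== PRECONDITION & SPEC =====
def Spec_is_sorted_palindrome (sequence : String) (out : Bool) : Prop := out = is_sorted_palindrome_alt sequence
instance (sequence : String) (out : Bool) : Decidable (Spec_is_sorted_palindrome sequence out) := by unfold Spec_is_sorted_palindrome; infer_instance

-- ===== CLAIM (what is proved, stated in full; the proofs are below) =====
def Claim_equal_is_sorted_palindrome : Prop := ∀ (sequence : String), Dom_is_sorted_palindrome sequence → Spec_is_sorted_palindrome sequence (is_sorted_palindrome sequence)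

-- ===== LEMMAS AND PROOFS =====

lemma pvCeilHalf_eq (n : Nat) : pvCeilHalf ((n : Int) - 1) = ((n / 2 : Nat) : Int) := by
  unfold pvCeilHalf
  rw [PySem.Int.neg_floordiv_neg_eq_iff_of_pos (by omega)]
  omega

lemma pvPalLoop_spec (l : List Char) (m : Nat) (hm : m ≤ l.length / 2) :
    ∀ k a : Nat, m = a + k →
      pvPalLoop l ((l.length : Int) - 1 - a) (PySem.List.pyRange a m 1) =
        decide (∀ j : Nat, a ≤ j → j < m → l[j]? = l[l.length - 1 - j]?) := by
  intro k
  induction k with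
  | zero =>
    intro a ha
    rw [PySem.List.pyRange_one_eq_nil (by omega)]
    simp [pvPalLoop]; omega
  | succ k ih =>
    intro a ha
    have han : a < l.length := by omega
    have hen : l.length - 1 - a < l.length := by omega
    rw [PySem.List.pyRange_one_cons (by omega : (a : Int) < (m : Int))]
    have h1 : PySem.List.pyGet? l (a : Int) = some l[a] := by
      simp [PySem.List.pyGet?_natCast, List.getElem?_eq_getElem han]
    have h2 : PySem.List.pyGet? l ((l.length : Int) - 1 - a) = some l[l.length - 1 - a] := by
      have hc : ((l.length : Int) - 1 - a) = ((l.length - 1 - a : Nat) : Int) := by omega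
      rw [hc, PySem.List.pyGet?_natCast, List.getElem?_eq_getElem hen]
    simp only [pvPalLoop, h1, h2]
    by_cases heq : l[a] = l[l.length - 1 - a]
    · have hstep : ((l.length : Int) - 1 - a - 1) = ((l.length : Int) - 1 - ((a + 1 : Nat) : Int)) := by
        push_cast; ring
      have hrange : ((a : Int) + 1) = ((a + 1 : Nat) : Int) := by push_cast; ring
      have hbeq : (l[a] == l[l.length - 1 - a]) = true := by simp [heq]
      simp only [hbeq, Bool.not_true]
      rw [if_neg Bool.false_ne_true, hstep, hrange, ih (a + 1) (by omega)]
      have : (∀ j : Nat, a + 1 ≤ j → j < m → l[j]? = l[l.length - 1 - j]?) ↔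
             (∀ j : Nat, a ≤ j → j < m → l[j]? = l[l.length - 1 - j]?) := by
        constructor
        · intro h j hj hjm
          rcases Nat.eq_or_lt_of_le hj with rfl | hlt
          · rw [List.getElem?_eq_getElem han, List.getElem?_eq_getElem hen, heq]
          · exact h j hlt hjm
        · intro h j hj hjm; exact h j (by omega) hjm
      simp only [decide_eq_decide]
      exact this
    · have hne : (l[a] == l[l.length - 1 - a]) = false := by
        simp [heq]
      simp only [hne, Bool.not_false]
      have : ¬ (∀ j : Nat, a ≤ j → j < m → l[j]? = l[l.length - 1 - j]?) := by
        intro h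
        have := h a (le_refl a) (by omega)
        rw [List.getElem?_eq_getElem han, List.getElem?_eq_getElem hen] at this
        exact heq (by simpa using this)
      simp [this]

lemma pvSortLoop_spec (l : List Char) (m : Nat) (hm : m ≤ l.length / 2) :
    ∀ k a : Nat, m = a + k →
      pvSortLoop l (PySem.List.pyRange a m 1) =
        decide (∀ j : Nat, a ≤ j → j < m → l.getD j 'a' ≤ l.getD (j + 1) 'a') := by
  intro k
  induction k with
  | zero =>
    intro a ha
    rw [PySem.List.pyRange_one_eq_nil (by omega)]
    simp [pvSortLoop]; omega
  | succ k ih =>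
    intro a ha
    have han : a < l.length := by omega
    have han1 : a + 1 < l.length := by omega
    rw [PySem.List.pyRange_one_cons (by omega : (a : Int) < (m : Int))]
    have h1 : PySem.List.pyGet? l (a : Int) = some l[a] := by
      simp [PySem.List.pyGet?_natCast, List.getElem?_eq_getElem han]
    have hrange : ((a : Int) + 1) = ((a + 1 : Nat) : Int) := by push_cast; ring
    have h2 : PySem.List.pyGet? l ((a : Int) + 1) = some l[a + 1] := by
      rw [hrange, PySem.List.pyGet?_natCast, List.getElem?_eq_getElem han1]
    simp only [pvSortLoop, h1, h2]
    have hga : l.getD a 'a' = l[a] := List.getD_eq_getElem l 'a' han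
    have hga1 : l.getD (a + 1) 'a' = l[a + 1] := List.getD_eq_getElem l 'a' han1
    by_cases hgt : l[a + 1] < l[a]
    · rw [if_pos hgt]
      have : ¬ (∀ j : Nat, a ≤ j → j < m → l.getD j 'a' ≤ l.getD (j + 1) 'a') := by
        intro h
        have := h a (le_refl a) (by omega)
        rw [hga, hga1] at this
        exact absurd hgt (not_lt.mpr this)
      rw [eq_comm, decide_eq_false_iff_not]
      exact this
    · rw [if_neg hgt]
      rw [hrange, ih (a + 1) (by omega)]
      have : (∀ j : Nat, a + 1 ≤ j → j < m → l.getD j 'a' ≤ l.getD (j + 1) 'a') ↔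
             (∀ j : Nat, a ≤ j → j < m → l.getD j 'a' ≤ l.getD (j + 1) 'a') := by
        constructor
        · intro h j hj hjm
          rcases Nat.eq_or_lt_of_le hj with rfl | hlt
          · rw [hga, hga1]; exact not_lt.mp hgt
          · exact h j hlt hjm
        · intro h j hj hjm; exact h j (by omega) hjm
      simp only [decide_eq_decide]
      exact this

-- half-check characterises palindromes
lemma pvPalHalf_iff (l : List Char) :
    (∀ j : Nat, j < l.length / 2 → l[j]? = l[l.length - 1 - j]?) ↔ l.reverse = l := by
  constructor
  · intro h
    apply List.ext_getElem?
    intro i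
    by_cases hi : i < l.length
    · rw [List.getElem?_reverse hi]
      by_cases hhalf : i < l.length / 2
      · exact (h i hhalf).symm
      · by_cases hmid : l.length - 1 - i < l.length / 2
        · have := h (l.length - 1 - i) hmid
          have heq : l.length - 1 - (l.length - 1 - i) = i := by omega
          rw [heq] at this
          exact this
        · have : l.length - 1 - i = i := by omega
          rw [this]
    · rw [List.getElem?_eq_none (by simp only [List.length_reverse]; omega),
          List.getElem?_eq_none (by omega)]
  · intro h j hj
    conv_lhs => rw [← h]
    rw [List.getElem?_reverse (by omega)]

lemma pvIsPalindrome_eq (s : String) :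
    pvIsPalindrome s = decide (s.toList.reverse = s.toList) := by
  unfold pvIsPalindrome
  simp only [PySem.Str.len_eq]
  rw [pvCeilHalf_eq s.toList.length, show ((0:Int) = ((0:Nat):Int)) by norm_num]
  have := pvPalLoop_spec s.toList (s.toList.length / 2) (le_refl _) (s.toList.length / 2) 0 (by omega)
  simp only [Nat.cast_zero, Int.sub_zero] at this ⊢
  rw [this]
  simp only [decide_eq_decide]
  constructor
  · intro h; exact (pvPalHalf_iff s.toList).mp (fun j hj => h j (by omega) hj)
  · intro h j _ hj; exact (pvPalHalf_iff s.toList).mpr h j hj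

-- pairwise-≤ of a list is exactly adjacent non-decrease (≤ is transitive)
lemma pvPairwise_le_iff_adj (t : List Char) :
    t.Pairwise (· ≤ ·) ↔ ∀ i, (h : i + 1 < t.length) → t[i] ≤ t[i + 1] := by
  constructor
  · intro h i hi
    exact List.pairwise_iff_getElem.mp h i (i + 1) (by omega) hi (by omega)
  · intro h
    rw [List.pairwise_iff_getElem]
    have key : ∀ d i j, (hij : i + d = j) → (hj : j < t.length) → t[i]'(by omega) ≤ t[j]'hj := by
      intro d
      induction d with
      | zero =>
        intro i j hij hj
        have : i = j := by omega
        subst this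
        exact le_refl _
      | succ d ih =>
        intro i j hij hj
        have hj1 : j - 1 < t.length := by omega
        have hstep := h (j - 1) (by omega)
        simp only [show j - 1 + 1 = j from by omega] at hstep
        exact le_trans (ih i (j - 1) (by omega) hj1) hstep
    intro i j hi hj hij
    exact key (j - i) i j (by omega) hj

-- adjacent non-decrease on indices < n/2 is exactly pairwise-≤ of take (n/2+1)
lemma pvAdj_iff_pairwise (l : List Char) :
    (∀ j : Nat, j < l.length / 2 → l.getD j 'a' ≤ l.getD (j + 1) 'a') ↔
      (l.take (l.length / 2 + 1)).Pairwise (· ≤ ·) := by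
  rw [pvPairwise_le_iff_adj]
  have hlen : (l.take (l.length / 2 + 1)).length = min (l.length / 2 + 1) l.length := by
    simp
  constructor
  · intro h i hi
    rw [hlen] at hi
    have hi2 : i < l.length / 2 := by omega
    have := h i hi2
    rw [List.getD_eq_getElem l 'a' (by omega), List.getD_eq_getElem l 'a' (by omega)] at this
    simpa [List.getElem_take] using this
  · intro h j hj
    have := h j (by rw [hlen]; omega)
    rw [List.getD_eq_getElem l 'a' (by omega), List.getD_eq_getElem l 'a' (by omega)]
    simpa [List.getElem_take] using this

lemma pvSorted_eq_iff (t : List Char) :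
    (t = PySem.List.sorted t (fun c => c) false) ↔ t.Pairwise (· ≤ ·) := by
  constructor
  · intro h
    have := PySem.List.sorted_pairwise t (fun c => c) (κ := Char)
    rw [← h] at this
    simpa using this
  · intro h
    exact (PySem.List.sorted_eq_self_of_pairwise t (fun c => c) (by exact h)).symm

-- ===== VERDICT (by name: the statement is the Claim_ definition above) =====
theorem is_sorted_palindrome_spec : Claim_equal_is_sorted_palindrome := by
  intro s _
  unfold Spec_is_sorted_palindrome
  unfold is_sorted_palindrome is_sorted_palindrome_alt
  dsimp only
  rw [pvIsPalindrome_eq]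
  set l := s.toList with hl
  have hrev : (PySem.Str.slice? s none none (-1) == some s) = decide (l.reverse = l) := by
    rw [PySem.Str.slice?_none_none_neg_one, Bool.eq_iff_iff]
    simp only [beq_iff_eq, Option.some.injEq, decide_eq_true_eq]
    constructor
    · intro h
      have := congrArg String.toList h
      simpa [hl] using this
    · intro h
      rw [← hl, h, hl]
      exact String.ofList_toList
  have hpfx : PySem.List.slice l none (some (PySem.Int.floordiv (PySem.Str.len s) 2 + 1)) =
      l.take (l.length / 2 + 1) := by
    rw [PySem.Str.len_eq, ← hl]
    have h2 : PySem.Int.floordiv ((l.length : Int)) 2 + 1 = ((l.length / 2 + 1 : Nat) : Int) := by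
      rw [show ((2:Int) = ((2:Nat):Int)) by norm_num, PySem.Int.floordiv_natCast]
      push_cast; ring
    rw [h2, PySem.List.slice_to_natCast]
  have hmid : pvCeilHalf (PySem.Str.len s - 1) = ((l.length / 2 : Nat) : Int) := by
    rw [PySem.Str.len_eq, ← hl, pvCeilHalf_eq]
  rw [hrev, hmid, hpfx]
  by_cases hp : l.reverse = l
  · have hd : decide (l.reverse = l) = true := by simp [hp]
    rw [hd]
    simp only [Bool.not_true]
    rw [if_neg Bool.false_ne_true]
    simp only [Bool.true_and]
    rw [show ((0:Int) = ((0:Nat):Int)) by norm_num]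
    rw [pvSortLoop_spec l (l.length / 2) (le_refl _) (l.length / 2) 0 (by omega)]
    rw [Bool.eq_iff_iff]
    simp only [decide_eq_true_eq, beq_iff_eq]
    rw [pvSorted_eq_iff, ← pvAdj_iff_pairwise]
    constructor
    · intro h j hj
      exact h j (Nat.zero_le j) hj
    · intro h j _ hj
      exact h j hj
  · have hd : decide (l.reverse = l) = false := by simp [hp]
    rw [hd]
    simp only [Bool.not_false]
    simp only [if_true, Bool.false_and]
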